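-- pv_equiv track=rewrite | github.com/rajatsinghten/HackSRM7 | server/engine/lossless.py | _remove_subsumed
-- ===== SOURCE A (Python) =====
-- from typing import Dict, List, Tuple
--
-- def _remove_subsumed(patterns: List[Tuple[str, int]]) -> List[Tuple[str, int]]:
--     """
--     Remove patterns that are entirely contained within a higher-savings
--     pattern earlier in the list (they will be consumed by the longer
--     substitution and won't need their own entry).
--     """
--     result: List[Tuple[str, int]] = []
--     for i, (pat_i, cnt_i) in enumerate(patterns):
--         subsumed = any(
--             pat_i in pat_j
--             for j, (pat_j, _) in enumerate(patterns)
--             if j < i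
--         )
--         if not subsumed:
--             result.append((pat_i, cnt_i))
--     return result
-- ===== SOURCE B (Python) =====
-- from typing import List, Tuple
--
-- def _remove_subsumed(patterns: List[Tuple[str, int]]) -> List[Tuple[str, int]]:
--     # Check only against already-KEPT patterns: substring containment is
--     # transitive, so a pattern contained in a removed earlier pattern is
--     # also contained in the kept pattern that removed it.
--     result: List[Tuple[str, int]] = []
--     for pat, cnt in patterns:
--         if not any(pat in kept for kept, _ in result):
--             result.append((pat, cnt))
--     return result
-- ===== Notes on version B (the rewrite author's own statement) =====
-- stated objective: alternative
-- what changed: B tests each pattern only against the already-kept patterns in its accumulator (valid by transitivity of substring containment), instead of A's inner enumerate scan over the entire prefix of the input list.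
import Mathlib
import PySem

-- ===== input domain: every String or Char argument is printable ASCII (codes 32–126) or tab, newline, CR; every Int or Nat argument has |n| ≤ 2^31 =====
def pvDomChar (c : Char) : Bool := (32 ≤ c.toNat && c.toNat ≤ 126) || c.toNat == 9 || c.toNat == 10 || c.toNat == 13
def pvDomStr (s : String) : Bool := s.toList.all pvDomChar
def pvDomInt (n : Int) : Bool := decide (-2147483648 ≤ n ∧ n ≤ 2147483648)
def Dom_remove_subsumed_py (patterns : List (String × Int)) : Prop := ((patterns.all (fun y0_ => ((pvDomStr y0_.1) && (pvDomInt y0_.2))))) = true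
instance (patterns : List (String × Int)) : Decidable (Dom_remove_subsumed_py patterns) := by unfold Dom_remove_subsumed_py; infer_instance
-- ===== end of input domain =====

-- B checks each pattern only against the already-kept patterns (transitivity of
-- substring containment) instead of A's inner scan over the whole input prefix.

-- ===== PORT A =====
def remove_subsumed_py (patterns : List (String × Int)) : List (String × Int) :=
  (PySem.List.enumerate patterns 0).foldl
    (fun result ip =>
      let subsumed := (PySem.List.enumerate patterns 0).any
        (fun jq => decide (jq.1 < ip.1) && PySem.Str.isIn ip.2.1 jq.2.1)
      if subsumed then result else result ++ [ip.2])
    []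

-- ===== PORT B =====
def remove_subsumed_py_alt (patterns : List (String × Int)) : List (String × Int) :=
  patterns.foldl
    (fun result p =>
      if result.any (fun q => PySem.Str.isIn p.1 q.1) then result else result ++ [p])
    []

-- ===== PRECONDITION & SPEC =====
def Spec_remove_subsumed_py (patterns : List (String × Int)) (out : List (String × Int)) : Prop := out = remove_subsumed_py_alt patterns
instance (patterns : List (String × Int)) (out : List (String × Int)) : Decidable (Spec_remove_subsumed_py patterns out) := by unfold Spec_remove_subsumed_py; infer_instance

-- ===== CLAIM (what is proved, stated in full; the proofs are below) =====
def Claim_equal_remove_subsumed_py : Prop := ∀ (patterns : List (String × Int)), Dom_remove_subsumed_py patterns → Spec_remove_subsumed_py patterns (remove_subsumed_py patterns)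

-- ===== LEMMAS AND PROOFS =====

-- all indices of `enumerate xs s` are below i when s + |xs| ≤ i, so the index guard drops
theorem pv_any_enum_lt {α : Type} (c : α → Bool) :
    ∀ (xs : List α) (s i : Int), s + xs.length ≤ i →
      ((PySem.List.enumerate xs s).any (fun jq => decide (jq.1 < i) && c jq.2)) = xs.any c := by
  intro xs
  induction xs with
  | nil => intro s i _; simp [PySem.List.enumerate_nil]
  | cons x t ih =>
    intro s i h
    rw [PySem.List.enumerate_cons]
    simp only [List.any_cons]
    have hs : decide (s < i) = true := by
      simp only [List.length_cons] at h; push_cast at h; simp; omega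
    rw [hs, ih (s + 1) i (by simp only [List.length_cons] at h; push_cast at h ⊢; omega)]
    simp

-- all indices of `enumerate xs s` are ≥ i when i ≤ s, so the guarded any is false
theorem pv_any_enum_ge {α : Type} (c : α → Bool) :
    ∀ (xs : List α) (s i : Int), i ≤ s →
      ((PySem.List.enumerate xs s).any (fun jq => decide (jq.1 < i) && c jq.2)) = false := by
  intro xs
  induction xs with
  | nil => intro s i _; simp [PySem.List.enumerate_nil]
  | cons x t ih =>
    intro s i h
    rw [PySem.List.enumerate_cons]
    simp only [List.any_cons]
    have hs : decide (s < i) = false := by simp; omega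
    rw [hs, ih (s + 1) i (by omega)]
    simp

-- A's subsumption test at index |pre| over pre ++ suf is exactly an any over pre
theorem pv_subsumed_eq (pre suf : List (String × Int)) (s : String) :
    ((PySem.List.enumerate (pre ++ suf) 0).any
        (fun jq => decide (jq.1 < (pre.length : Int)) && PySem.Str.isIn s jq.2.1))
      = pre.any (fun q => PySem.Str.isIn s q.1) := by
  rw [PySem.List.enumerate_append, List.any_append,
    pv_any_enum_lt (fun q => PySem.Str.isIn s q.1) pre 0 (pre.length : Int) (by omega),
    pv_any_enum_ge (fun q => PySem.Str.isIn s q.1) suf (0 + (pre.length : Int)) (pre.length : Int) (by omega)]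
  simp

-- transitivity of Python's substring test
theorem pv_isIn_trans {a b c : String}
    (h1 : PySem.Str.isIn a b = true) (h2 : PySem.Str.isIn b c = true) :
    PySem.Str.isIn a c = true := by
  rw [PySem.Str.isIn_iff_infix] at *
  exact h1.trans h2

-- main loop correspondence: A's indexed fold over a suffix equals B's fold,
-- given the invariant that `pre` and `acc` contain the same strings as substrings
theorem pv_loop (full : List (String × Int)) :
    ∀ (suf pre acc : List (String × Int)), full = pre ++ suf →
      (∀ s : String, pre.any (fun q => PySem.Str.isIn s q.1) = acc.any (fun q => PySem.Str.isIn s q.1)) →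
      ((PySem.List.enumerate suf (pre.length : Int)).foldl
        (fun result ip =>
          let subsumed := (PySem.List.enumerate full 0).any
            (fun jq => decide (jq.1 < ip.1) && PySem.Str.isIn ip.2.1 jq.2.1)
          if subsumed then result else result ++ [ip.2]) acc)
      = suf.foldl
          (fun result p =>
            if result.any (fun q => PySem.Str.isIn p.1 q.1) then result else result ++ [p]) acc := by
  intro suf
  induction suf with
  | nil => intro pre acc _ _; simp [PySem.List.enumerate_nil]
  | cons p t ih =>
    intro pre acc hfull hinv
    rw [PySem.List.enumerate_cons]
    simp only [List.foldl_cons]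
    have hsub : ((PySem.List.enumerate full 0).any
        (fun jq => decide (jq.1 < (pre.length : Int)) && PySem.Str.isIn p.1 jq.2.1))
        = acc.any (fun q => PySem.Str.isIn p.1 q.1) := by
      rw [hfull, pv_subsumed_eq pre (p :: t) p.1, hinv p.1]
    have hlen : ((pre.length : Int) + 1) = (((pre ++ [p]).length : Int)) := by
      simp
    by_cases hc : acc.any (fun q => PySem.Str.isIn p.1 q.1) = true
    · -- subsumed: both drop p
      rw [hsub, hc]
      rw [hlen]
      refine ih (pre ++ [p]) acc (by simp [hfull]) ?_
      intro s
      rw [← hinv s, List.any_append]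
      simp only [List.any_cons, List.any_nil, Bool.or_false]
      by_cases hs : PySem.Str.isIn s p.1 = true
      · have hp : pre.any (fun q => PySem.Str.isIn p.1 q.1) = true := (hinv p.1).trans hc
        rcases List.any_eq_true.mp hp with ⟨q, hq, hq2⟩
        have hps : pre.any (fun q => PySem.Str.isIn s q.1) = true :=
          List.any_eq_true.mpr ⟨q, hq, pv_isIn_trans hs hq2⟩
        rw [hps, hs]; rfl
      · rw [eq_false_of_ne_true hs, Bool.or_false]
    · -- not subsumed: both keep p
      rw [hsub, eq_false_of_ne_true hc]
      rw [hlen]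
      refine ih (pre ++ [p]) (acc ++ [p]) (by simp [hfull]) ?_
      intro s
      rw [List.any_append, List.any_append, hinv s]

-- ===== VERDICT (by name: the statement is the Claim_ definition above) =====
theorem remove_subsumed_py_spec : Claim_equal_remove_subsumed_py := by
  intro patterns _
  unfold Spec_remove_subsumed_py remove_subsumed_py remove_subsumed_py_alt
  have h0 : (0 : Int) = ((([] : List (String × Int)).length : Int)) := by simp
  rw [h0]
  exact pv_loop patterns patterns [] [] (by simp) (fun s => by simp)
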